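-- pv_equiv track=rewrite | github.com/eunseo-kim/Algorithm | programmers/Programmers Challenge/grepp_intern(1).py | solution
-- ===== SOURCE A (Python) =====
-- from collections import defaultdict
--
-- def solution(arr):
--     answer = 0
--     nums = defaultdict(int)
--
--     for a in arr:
--         nums[a] += 1
--
--     keys = []
--     values = []
--     for key, value in sorted(nums.items()):
--         keys.append(key)
--         values.append(value)
--
--     diff = float("inf")
--
--     for i in range(1, len(keys)):
--         new_diff = abs(sum(values[:i]) - sum(values[i:]))
--         if new_diff < diff:
--             answer = keys[i - 1] + 1
--             diff = new_diff
--
--     return answer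
-- ===== SOURCE B (Python) =====
-- from collections import Counter
--
-- def solution(arr):
--     items = sorted(Counter(arr).items())
--     total = len(arr)
--     answer = 0
--     best = None
--     left = 0
--     for key, value in items[:-1]:
--         left += value
--         d = abs(2 * left - total)
--         if best is None or d < best:
--             answer = key + 1
--             best = d
--     return answer
-- ===== Notes on version B (the rewrite author's own statement) =====
-- stated objective: faster
-- what changed: B sorts the Counter items once and scans them with a single running prefix sum (diff = |2*left - total|), instead of A's re-summing both halves of the values list from scratch at every split point.
import Mathlib
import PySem

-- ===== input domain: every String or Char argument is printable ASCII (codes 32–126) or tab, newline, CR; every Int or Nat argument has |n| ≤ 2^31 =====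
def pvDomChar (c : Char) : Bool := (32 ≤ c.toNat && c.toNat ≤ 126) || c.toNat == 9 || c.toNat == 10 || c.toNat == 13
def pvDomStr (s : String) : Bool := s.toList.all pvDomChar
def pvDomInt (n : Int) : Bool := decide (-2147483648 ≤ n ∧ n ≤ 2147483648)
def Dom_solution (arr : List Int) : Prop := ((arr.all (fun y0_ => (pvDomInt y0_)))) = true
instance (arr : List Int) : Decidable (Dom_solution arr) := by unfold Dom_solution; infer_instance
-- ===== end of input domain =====

-- B replaces A's per-split re-summation of both halves (quadratic in the number of
-- distinct values) by a single running prefix sum over the sorted counts.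

-- `new_diff < diff` where diff starts as float("inf"): none models +∞ (diff only ever
-- holds ∞ or a previously computed integer new_diff, so this comparison is exact).
def pvLt (n : Int) : Option Int → Bool
  | none => true
  | some d => decide (n < d)

-- ===== PORT A =====
-- loop body of A's 'for i in range(1, len(keys))'
def pvStepA (keys values : List Int) (st : Int × Option Int) (i : Int) : Int × Option Int :=
  let nd : Int := |(PySem.List.slice values none (some i)).sum - (PySem.List.slice values (some i) none).sum|
  if pvLt nd st.2 then (PySem.List.pyGetD keys (i - 1) 0 + 1, some nd) else st

def solution (arr : List Int) : Int :=
  let nums := arr.foldl (fun d a => d.modify a 0 (· + 1)) PySem.Dict.empty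
  let kv := (PySem.List.sorted2 nums.items (fun p => p.1) (fun p => p.2)).foldl
      (fun (acc : List Int × List Int) p => (acc.1 ++ [p.1], acc.2 ++ [p.2])) ([], [])
  ((PySem.List.pyRange 1 (kv.1.length : Int) 1).foldl (pvStepA kv.1 kv.2) (0, none)).1

-- ===== PORT B =====
-- loop body of B's 'for key, value in items[:-1]'; state = (answer, best, left)
def pvStepB (total : Int) (st : Int × Option Int × Int) (p : Int × Int) : Int × Option Int × Int :=
  let left := st.2.2 + p.2
  let d : Int := |2 * left - total|
  if pvLt d st.2.1 then (p.1 + 1, some d, left) else (st.1, st.2.1, left)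

def solution_alt (arr : List Int) : Int :=
  let items := PySem.List.sorted2 (PySem.Dict.counter arr).items (fun p => p.1) (fun p => p.2)
  ((PySem.List.slice items none (some (-1))).foldl (pvStepB (arr.length : Int)) (0, none, 0)).1

-- ===== PRECONDITION & SPEC =====
def Spec_solution (arr : List Int) (out : Int) : Prop := out = solution_alt arr
instance (arr : List Int) (out : Int) : Decidable (Spec_solution arr out) := by unfold Spec_solution; infer_instance

-- ===== CLAIM (what is proved, stated in full; the proofs are below) =====
def Claim_equal_solution : Prop := ∀ (arr : List Int), Dom_solution arr → Spec_solution arr (solution arr)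

-- ===== LEMMAS AND PROOFS =====

-- core loop invariant: A's fold over range(1, n+1) (recomputing both half-sums with slices)
-- agrees with B's fold over the first n items carrying the running prefix sum.
lemma pvLoop (its : List (Int × Int)) (T : Int) (hT : (its.map (·.2)).sum = T) :
    ∀ n : Nat, n ≤ its.length →
    (((PySem.List.pyRange 1 ((n : Int) + 1) 1).foldl
        (pvStepA (its.map (·.1)) (its.map (·.2))) (0, none)).1
        = ((its.take n).foldl (pvStepB T) (0, none, 0)).1)
    ∧ (((PySem.List.pyRange 1 ((n : Int) + 1) 1).foldl
        (pvStepA (its.map (·.1)) (its.map (·.2))) (0, none)).2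
        = ((its.take n).foldl (pvStepB T) (0, none, 0)).2.1)
    ∧ (((its.take n).foldl (pvStepB T) (0, none, 0)).2.2
        = ((its.map (·.2)).take n).sum) := by
  intro n
  induction n with
  | zero =>
    intro _
    rw [show ((0 : Nat) : Int) + 1 = 1 by norm_num,
        PySem.List.pyRange_one_eq_nil (le_refl 1)]
    simp
  | succ n ih =>
    intro hn
    have hn' : n < its.length := by omega
    obtain ⟨ih1, ih2, ih3⟩ := ih (by omega)
    have hrange : PySem.List.pyRange 1 (((n + 1 : Nat) : Int) + 1) 1
        = PySem.List.pyRange 1 ((n : Int) + 1) 1 ++ [(n : Int) + 1] := by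
      have : (((n + 1 : Nat) : Int) + 1) = ((n : Int) + 1) + 1 := by push_cast; ring
      rw [this, PySem.List.pyRange_one_succ_right (by omega)]
    have htake : its.take (n + 1) = its.take n ++ [its[n]] := by
      rw [List.take_add_one, List.getElem?_eq_getElem hn']
      rfl
    rw [hrange, htake, List.foldl_append, List.foldl_append]
    simp only [List.foldl_cons, List.foldl_nil]
    set stA := (PySem.List.pyRange 1 ((n : Int) + 1) 1).foldl
        (pvStepA (its.map (·.1)) (its.map (·.2))) (0, none) with hstA
    set stB := (its.take n).foldl (pvStepB T) (0, none, 0) with hstB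
    -- evaluate the two step bodies at i = n+1 / p = its[n]
    have hcast : ((n : Int) + 1) = ((n + 1 : Nat) : Int) := by push_cast; ring
    have hslice1 : PySem.List.slice (its.map (·.2)) none (some ((n : Int) + 1))
        = (its.map (·.2)).take (n + 1) := by
      rw [hcast, PySem.List.slice_to_natCast]
    have hslice2 : PySem.List.slice (its.map (·.2)) (some ((n : Int) + 1)) none
        = (its.map (·.2)).drop (n + 1) := by
      rw [hcast, PySem.List.slice_from_natCast]
    have hkey : PySem.List.pyGetD (its.map (·.1)) ((n : Int) + 1 - 1) 0 = its[n].1 := by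
      have : ((n : Int) + 1 - 1) = ((n : Nat) : Int) := by ring
      rw [this, PySem.List.pyGetD_natCast, List.getD_eq_getElem _ _ (by simpa using hn')]
      simp
    have hvn : (its.map (·.2))[n]'(by simpa using hn') = its[n].2 := by simp
    have hleft : stB.2.2 + its[n].2 = ((its.map (·.2)).take (n + 1)).sum := by
      rw [ih3, ← hvn, List.sum_take_succ _ n (by simpa using hn')]
    have habs : ((its.map (·.2)).take (n + 1)).sum - ((its.map (·.2)).drop (n + 1)).sum
        = 2 * (((its.map (·.2)).take (n + 1)).sum) - T := by
      have hsplit := List.sum_take_add_sum_drop (its.map (·.2)) (n + 1)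
      rw [hT] at hsplit
      omega
    show (pvStepA _ _ stA ((n:Int)+1)).1 = (pvStepB T stB its[n]).1
      ∧ (pvStepA _ _ stA ((n:Int)+1)).2 = (pvStepB T stB its[n]).2.1
      ∧ (pvStepB T stB its[n]).2.2 = ((its.map (·.2)).take (n+1)).sum
    unfold pvStepA pvStepB
    simp only [hslice1, hslice2, hkey, ih2, habs, hleft]
    by_cases hc : pvLt (|2 * ((its.map (·.2)).take (n + 1)).sum - T|) stB.2.1 = true
    · simp [hc]
    · simp [hc, ih1, ih2]

-- sum of the (sorted) multiplicities is the length of arr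
lemma pvTotal (arr : List Int) :
    ((PySem.List.sorted2 (PySem.Dict.counter arr).items (fun p => p.1) (fun p => p.2)).map
      (·.2)).sum = (arr.length : Int) := by
  have hperm := (PySem.List.sorted2_perm (PySem.Dict.counter arr).items
      (fun p => p.1) (fun p => p.2) false).map (·.2)
  rw [hperm.sum_eq, PySem.Dict.items_counter, List.map_map]
  have hcomp : ((fun x : Int × Int => x.2) ∘ fun k : Int => (k, ((arr.count k : Nat) : Int)))
      = fun k : Int => ((arr.count k : Nat) : Int) := rfl
  rw [hcomp]
  have hperm2 : (PySem.Set.ofList arr).Perm arr.dedup := by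
    rw [List.perm_ext_iff_of_nodup (PySem.Set.nodup_ofList arr) arr.nodup_dedup]
    intro a
    rw [PySem.Set.mem_ofList, List.mem_dedup]
  have hcast : (fun k : Int => ((arr.count k : Nat) : Int))
      = (Nat.cast ∘ fun k : Int => arr.count k) := rfl
  rw [(hperm2.map (fun k => ((arr.count k : Nat) : Int))).sum_eq, hcast,
      ← List.map_map, ← Nat.cast_list_sum, List.sum_map_count_dedup_eq_length]

-- A's (keys, values) building loop produces the two projections
lemma pvKV (l : List (Int × Int)) :
    l.foldl (fun (acc : List Int × List Int) p => (acc.1 ++ [p.1], acc.2 ++ [p.2])) ([], [])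
      = (l.map (·.1), l.map (·.2)) := by
  rw [PySem.List.foldl_prod_mk (fun a (p : Int × Int) => a ++ [p.1])
      (fun a (p : Int × Int) => a ++ [p.2]) l [] []]
  rw [PySem.List.foldl_append_singleton_eq_map, PySem.List.foldl_append_singleton_eq_map]
  simp

lemma pvMain' (its : List (Int × Int)) (T : Int) (hT : (its.map (·.2)).sum = T) :
    ((PySem.List.pyRange 1 (its.length : Int) 1).foldl
        (pvStepA (its.map (·.1)) (its.map (·.2))) (0, none)).1
      = (its.dropLast.foldl (pvStepB T) (0, none, 0)).1 := by
  cases its with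
  | nil =>
    rw [show ((List.length ([] : List (Int × Int)) : Int)) = 0 by simp,
        PySem.List.pyRange_one_eq_nil (by norm_num)]
    simp
  | cons h t =>
    have hlen : (((h :: t).length : Int)) = ((t.length : Nat) : Int) + 1 := by
      simp [List.length_cons]
    have hdrop : (h :: t).dropLast = (h :: t).take t.length := by
      rw [List.dropLast_eq_take]
      simp
    rw [hlen, hdrop]
    exact (pvLoop (h :: t) T hT t.length (by simp)).1

lemma pvMain (arr : List Int) : solution arr = solution_alt arr := by
  unfold solution solution_alt
  rw [← PySem.Dict.counter_eq_foldl]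
  simp only [pvKV, PySem.List.slice_to_neg_one, List.length_map]
  exact pvMain' _ _ (pvTotal arr)

-- ===== VERDICT (by name: the statement is the Claim_ definition above) =====
theorem solution_spec : Claim_equal_solution := by
  intro arr _
  unfold Spec_solution
  exact pvMain arr
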